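-- pv_equiv track=rewrite | github.com/Apjo/algorithms_and_datastructures | src/dsa/python/arrays/min_ops_to_reach_target.py | minOperations2
-- ===== SOURCE A (Python) =====
-- from typing import List
--
-- def minOperations2(nums: List[int], target: List[int]) -> int:
--     if not nums or len(nums) != len(target):
--         return 0
--     N = len(nums)
--     ans=0
--     seen=set()
--     for i in range(N):
--         if nums[i] != target[i]:
--             seen.add(nums[i])
--     return len(seen)
-- ===== SOURCE B (Python) =====
-- from typing import List
--
-- def minOperations2(nums: List[int], target: List[int]) -> int:
--     if not nums or len(nums) != len(target):
--         return 0
--     vals = sorted(a for a, b in zip(nums, target) if a != b)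
--     count = 0
--     prev = None
--     for v in vals:
--         if prev is None or v > prev:
--             count += 1
--         prev = v
--     return count
-- ===== Notes on version B (the rewrite author's own statement) =====
-- stated objective: alternative
-- what changed: Replaces the index loop that accumulates mismatched values in a hash set with a zip-filter comprehension that is sorted once and scanned, counting strictly increasing adjacent steps to get the number of distinct mismatched values.
import Mathlib
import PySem

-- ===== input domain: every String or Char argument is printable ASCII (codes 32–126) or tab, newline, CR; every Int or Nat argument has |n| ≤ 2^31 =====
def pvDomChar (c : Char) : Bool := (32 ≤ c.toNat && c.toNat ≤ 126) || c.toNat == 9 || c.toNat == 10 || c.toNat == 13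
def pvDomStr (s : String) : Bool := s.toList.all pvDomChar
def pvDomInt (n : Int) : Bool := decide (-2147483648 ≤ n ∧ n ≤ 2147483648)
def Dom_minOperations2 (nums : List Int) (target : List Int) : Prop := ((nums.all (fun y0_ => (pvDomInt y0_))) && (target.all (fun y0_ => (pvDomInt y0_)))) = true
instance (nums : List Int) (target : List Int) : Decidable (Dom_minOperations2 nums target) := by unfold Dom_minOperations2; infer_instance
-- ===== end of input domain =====

-- B replaces A's hash-set accumulation over an index loop by a zip-filter, sort, and
-- adjacent-compare scan counting distinct mismatched values; alternative decomposition, same results.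


-- ===== PORT A =====
def minOperations2 (nums : List Int) (target : List Int) : Int :=
  if nums = [] ∨ nums.length ≠ target.length then 0
  else
    let N : Int := nums.length
    let seen : PySem.Set Int :=
      (PySem.List.pyRange 0 N 1).foldl
        (fun seen i =>
          if PySem.List.pyGetD nums i 0 ≠ PySem.List.pyGetD target i 0 then
            PySem.Set.add seen (PySem.List.pyGetD nums i 0)
          else seen)
        PySem.Set.empty
    PySem.Set.len seen

-- ===== PORT B =====
-- one scan step: count += 1 when prev is None or v > prev; prev := v
def pvCountStep (s : Int × Option Int) (v : Int) : Int × Option Int :=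
  ((match s.2 with
    | none => s.1 + 1
    | some p => if p < v then s.1 + 1 else s.1), some v)

def minOperations2_alt (nums : List Int) (target : List Int) : Int :=
  if nums = [] ∨ nums.length ≠ target.length then 0
  else
    let vals : List Int :=
      PySem.List.sorted (((nums.zip target).filter (fun p => p.1 != p.2)).map Prod.fst)
        (fun x => x) false
    (vals.foldl pvCountStep (0, none)).1

-- ===== PRECONDITION & SPEC =====
def Spec_minOperations2 (nums : List Int) (target : List Int) (out : Int) : Prop := out = minOperations2_alt nums target
instance (nums : List Int) (target : List Int) (out : Int) : Decidable (Spec_minOperations2 nums target out) := by unfold Spec_minOperations2; infer_instance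

-- ===== CLAIM (what is proved, stated in full; the proofs are below) =====
def Claim_equal_minOperations2 : Prop := ∀ (nums : List Int) (target : List Int), Dom_minOperations2 nums target → Spec_minOperations2 nums target (minOperations2 nums target)

-- ===== LEMMAS AND PROOFS =====

-- A's index loop over both lists is the fold over their zip (equal lengths)
theorem pv_range_fold_zip (xs ys : List Int)
    (h : xs.length = ys.length) (s : PySem.Set Int) :
    (List.range xs.length).foldl
      (fun s k => if xs.getD k 0 = ys.getD k 0 then s else PySem.Set.add s (xs.getD k 0)) s
    = (xs.zip ys).foldl
      (fun s p => if p.1 = p.2 then s else PySem.Set.add s p.1) s := by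
  induction xs generalizing ys s with
  | nil => simp
  | cons x xs ih =>
    cases ys with
    | nil => simp at h
    | cons y ys =>
      simp only [List.length_cons, List.range_succ_eq_map, List.foldl_cons, List.foldl_map,
        List.getD_cons_zero, List.zip_cons_cons]
      simp only [Nat.succ_eq_add_one, List.getD_cons_succ]
      exact ih ys (by simpa using h) _

-- a conditional-insert fold is the plain fold over the filtered projection
theorem pv_fold_filter (l : List (Int × Int)) (s : PySem.Set Int) :
    l.foldl (fun s p => if p.1 = p.2 then s else PySem.Set.add s p.1) s
    = ((l.filter (fun p => p.1 != p.2)).map Prod.fst).foldl PySem.Set.add s := by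
  induction l generalizing s with
  | nil => rfl
  | cons p l ih =>
    simp only [List.foldl_cons, List.filter_cons]
    by_cases hp : p.1 = p.2
    · simp only [bne_iff_ne, ne_eq, hp, not_true_eq_false, if_false]
      exact ih s
    · simp only [bne_iff_ne, ne_eq, hp, not_false_eq_true, if_true, List.map_cons,
        List.foldl_cons]
      exact ih (PySem.Set.add s p.1)

-- A's answer on the mismatched values: size of the set = number of distinct values
theorem pv_len_ofList (xs : List Int) :
    PySem.Set.len (PySem.Set.ofList xs) = (xs.toFinset.card : Int) := by
  have hd : PySem.List.dedup xs = PySem.Set.ofList xs := PySem.List.dedup_eq_ofList xs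
  have hn : (PySem.List.dedup xs).Nodup := PySem.List.nodup_dedup xs
  have hf : (PySem.List.dedup xs).toFinset = xs.toFinset := by
    ext a; simp only [List.mem_toFinset, PySem.List.mem_dedup]
  have hl : (PySem.List.dedup xs).length = xs.toFinset.card := by
    rw [← List.toFinset_card_of_nodup hn, hf]
  rw [← hd, PySem.Set.len, hl]

-- B's scan with a running previous element counts the distinct values of a ≤-sorted list
theorem pv_scan_from (l : List Int) (c x : Int)
    (hp : l.Pairwise (· ≤ ·)) (hx : ∀ y ∈ l, x ≤ y) :
    (l.foldl pvCountStep (c, some x)).1 = c + ((l.toFinset.erase x).card : Int) := by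
  induction l generalizing c x with
  | nil => simp
  | cons y l ih =>
    have hxy : x ≤ y := hx y (by simp)
    have hyl : ∀ z ∈ l, y ≤ z := fun z hz => (List.pairwise_cons.mp hp).1 z hz
    have hpl : l.Pairwise (· ≤ ·) := (List.pairwise_cons.mp hp).2
    by_cases hlt : x < y
    · have hxny : x ∉ (y :: l).toFinset := by
        simp only [List.toFinset_cons, Finset.mem_insert, List.mem_toFinset]
        push Not
        exact ⟨by omega, fun hm => by have := hyl x hm; omega⟩
      have hcard : ((y :: l).toFinset.erase x).card = 1 + (l.toFinset.erase y).card := by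
        rw [Finset.erase_eq_of_notMem hxny, List.toFinset_cons]
        have : insert y l.toFinset = insert y (l.toFinset.erase y) := by
          ext a; simp [Finset.mem_insert, Finset.mem_erase]; tauto
        rw [this, Finset.card_insert_of_notMem (Finset.notMem_erase y _)]
        omega
      have := ih (c + 1) y hpl hyl
      simp only [List.foldl_cons, pvCountStep, if_pos hlt] at *
      rw [this, hcard]; push_cast; ring
    · have hxe : x = y := le_antisymm hxy (by omega)
      have hcard : ((y :: l).toFinset.erase x).card = (l.toFinset.erase y).card := by
        rw [hxe, List.toFinset_cons, Finset.erase_insert_eq_erase]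
      have := ih c y hpl hyl
      simp only [List.foldl_cons, pvCountStep, if_neg hlt] at *
      rw [this, hcard]

theorem pv_scan (l : List Int) (hp : l.Pairwise (· ≤ ·)) :
    (l.foldl pvCountStep (0, none)).1 = (l.toFinset.card : Int) := by
  cases l with
  | nil => simp
  | cons y l =>
    have hyl : ∀ z ∈ l, y ≤ z := fun z hz => (List.pairwise_cons.mp hp).1 z hz
    have hpl : l.Pairwise (· ≤ ·) := (List.pairwise_cons.mp hp).2
    have := pv_scan_from l 1 y hpl hyl
    simp only [List.foldl_cons, pvCountStep, zero_add] at *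
    have h2 : insert y l.toFinset = insert y (l.toFinset.erase y) := by
      ext a; simp [Finset.mem_insert, Finset.mem_erase]; tauto
    rw [this, List.toFinset_cons, h2,
      Finset.card_insert_of_notMem (Finset.notMem_erase y _)]
    push_cast; ring

-- ===== VERDICT (by name: the statement is the Claim_ definition above) =====
theorem minOperations2_spec : Claim_equal_minOperations2 := by
  intro nums target _
  unfold Spec_minOperations2 minOperations2 minOperations2_alt
  by_cases hg : nums = [] ∨ nums.length ≠ target.length
  · simp [hg]
  · rw [if_neg hg, if_neg hg]
    have hlen : nums.length = target.length := by
      push Not at hg; exact hg.2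
    set vals : List Int := ((nums.zip target).filter (fun p => p.1 != p.2)).map Prod.fst with hvals
    have hA :
        (PySem.List.pyRange 0 (nums.length : Int) 1).foldl
          (fun seen i =>
            if PySem.List.pyGetD nums i 0 ≠ PySem.List.pyGetD target i 0 then
              PySem.Set.add seen (PySem.List.pyGetD nums i 0)
            else seen) PySem.Set.empty
        = PySem.Set.ofList vals := by
      rw [PySem.List.pyRange_zero_nat, List.foldl_map]
      simp only [PySem.List.pyGetD_natCast, ne_eq, ite_not]
      rw [pv_range_fold_zip nums target hlen, pv_fold_filter, hvals,
        PySem.Set.ofList_eq_foldl]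
      rfl
    simp only [hA, pv_len_ofList]
    have hperm := PySem.List.sorted_perm vals (fun x => x) false
    have hpair := PySem.List.sorted_pairwise vals (fun x => x)
    rw [pv_scan _ hpair, List.toFinset_eq_of_perm _ _ hperm]
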